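-- pv_equiv track=rewrite | github.com/CHARLEC704/comp110-23s-workspace | exercises/ex07/dictionary.py | count
-- ===== SOURCE A (Python) =====
-- def count(given_list: list[str]) -> dict[str, int]:
--     """Given a list of colors, this function will produce a dictionary of colors that appeared in list as keys and number of times as the values."""
--     return_dict: dict[str, int] = dict()
--     for color in given_list:
--         if color in return_dict:
--             return_dict[color] += 1
--         else:
--             return_dict[color] = 1
--     return return_dict
-- ===== SOURCE B (Python) =====
-- def count(given_list: list[str]) -> dict[str, int]:
--     """Given a list of colors, this function will produce a dictionary of colors that appeared in list as keys and number of times as the values."""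
--     keys = list(dict.fromkeys(given_list))
--     return {k: given_list.count(k) for k in keys}
-- ===== Notes on version B (the rewrite author's own statement) =====
-- stated objective: alternative
-- what changed: B replaces A's single-pass dict with membership-tested increments by a two-phase plan: dedupe the keys in first-appearance order with dict.fromkeys, then build the result with one list.count scan per distinct key.
import Mathlib
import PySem

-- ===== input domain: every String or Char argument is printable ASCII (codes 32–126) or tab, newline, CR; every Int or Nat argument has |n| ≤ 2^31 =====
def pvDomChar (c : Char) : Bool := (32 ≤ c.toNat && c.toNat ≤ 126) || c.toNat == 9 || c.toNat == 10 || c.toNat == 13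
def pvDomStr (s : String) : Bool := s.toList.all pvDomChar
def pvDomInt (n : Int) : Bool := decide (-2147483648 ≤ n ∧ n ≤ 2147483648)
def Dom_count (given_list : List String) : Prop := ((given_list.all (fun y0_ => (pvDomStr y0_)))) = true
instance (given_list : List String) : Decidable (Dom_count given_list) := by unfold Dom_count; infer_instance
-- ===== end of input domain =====

-- B counts each first-appearance-distinct key with one list.count scan instead of A's incremental dict
-- (an alternative decomposition of the same task; not faster).

-- ===== PORT A =====
-- A: one pass over the list, incrementing a dict entry when the key is present, else setting it to 1.
def count (given_list : List String) : List (String × Int) :=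
  (given_list.foldl
    (fun d color =>
      if d.contains color then d.insert color (d.getD color 0 + 1)
      else d.insert color 1)
    PySem.Dict.empty).items

-- ===== PORT B =====
-- B: dedupe the keys in first-appearance order (dict.fromkeys), then count each key with list.count.
def count_alt (given_list : List String) : List (String × Int) :=
  (PySem.List.dedup given_list).map (fun k => (k, (given_list.count k : Int)))

-- ===== PRECONDITION & SPEC =====
def Spec_count (given_list : List String) (out : List (String × Int)) : Prop := out = count_alt given_list
instance (given_list : List String) (out : List (String × Int)) : Decidable (Spec_count given_list out) := by unfold Spec_count; infer_instance

-- ===== CLAIM (what is proved, stated in full; the proofs are below) =====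
def Claim_equal_count : Prop := ∀ (given_list : List String), Dom_count given_list → Spec_count given_list (count given_list)

-- ===== LEMMAS AND PROOFS =====
-- The two step functions of A's fold coincide: when the key is absent, getD is 0.
theorem count_step_eq :
    (fun (d : PySem.Dict String Int) color =>
      if d.contains color then d.insert color (d.getD color 0 + 1)
      else d.insert color 1) =
    (fun (d : PySem.Dict String Int) x => d.insert x (d.getD x 0 + 1)) := by
  funext d c
  by_cases h : d.contains c
  · simp [h]
  · have h0 : d.get? c = none := (PySem.Dict.get?_eq_none_iff_contains d c).mpr (by simpa using h)
    simp [h, PySem.Dict.getD, h0]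

-- ===== VERDICT (by name: the statement is the Claim_ definition above) =====
theorem count_spec : Claim_equal_count := by
  intro given_list _
  unfold Spec_count count count_alt
  rw [count_step_eq, PySem.Dict.foldl_insert_getD_add_one_eq_counter,
    PySem.Dict.items_counter]
  simp
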